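-- pv_equiv track=rewrite | github.com/bakunobu/exercise | 1400_basic_tasks/chap_11/ex_11_111.py | length_even_nums
-- ===== SOURCE A (Python) =====
-- def length_even_nums(nums:list) -> int:
--     i = 0
--     longest = 0
--     for x in nums:
--         if x % 2:
--             i += 1
--         else:
--             longest = max(i, longest)
--             i = 0
--     return(longest)
-- ===== SOURCE B (Python) =====
-- def length_even_nums(nums: list) -> int:
--     # Scan run-by-run: advance j over a maximal run of odds; if it hits the end
--     # the run is unterminated (not counted), else it is ended by the even at j
--     # and the run [i, j) competes for the maximum.
--     best, i, n = 0, 0, len(nums)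
--     while True:
--         j = i
--         while j < n and nums[j] % 2 != 0:
--             j += 1
--         if j == n:
--             return best
--         best = max(best, j - i)
--         i = j + 1
-- ===== Notes on version B (the rewrite author's own statement) =====
-- stated objective: alternative
-- what changed: Replaces A's single-pass two-accumulator (current-run counter + running max) loop by a run-boundary scanner: an inner index loop skips each maximal run of odds and the run is counted only when terminated by an even, so a trailing odd run (or all-odd input) yields no candidate.
import Mathlib
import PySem

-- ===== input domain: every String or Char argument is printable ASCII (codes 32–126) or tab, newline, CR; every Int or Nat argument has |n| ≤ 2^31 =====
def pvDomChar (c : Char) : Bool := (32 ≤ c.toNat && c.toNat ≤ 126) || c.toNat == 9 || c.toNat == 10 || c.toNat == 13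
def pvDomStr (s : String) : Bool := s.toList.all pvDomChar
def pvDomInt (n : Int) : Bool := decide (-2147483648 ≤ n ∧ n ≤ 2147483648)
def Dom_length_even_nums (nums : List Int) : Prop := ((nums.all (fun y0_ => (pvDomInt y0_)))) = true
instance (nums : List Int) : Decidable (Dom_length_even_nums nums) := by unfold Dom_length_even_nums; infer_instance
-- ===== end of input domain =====

-- B replaces A's single-pass two-accumulator loop by a run-boundary scanner: an inner index loop skips each maximal odd run, counted only when terminated by an even (alternative decomposition).


-- ===== PORT A =====
def length_even_nums (nums : List Int) : Int :=
  (nums.foldl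
    (fun (s : Int × Int) x =>
      if PySem.Int.mod x 2 ≠ 0 then (s.1 + 1, s.2)
      else (0, max s.1 s.2))
    (0, 0)).2

-- ===== PORT B =====
-- inner `while j < n and nums[j] % 2 != 0: j += 1`; fuel is a totality guard (never exhausted: one unit per step)
def pvScanOdd (nums : List Int) (fuel : Nat) (j : Nat) : Nat :=
  match fuel with
  | 0 => j
  | fuel + 1 =>
    if j < nums.length ∧ PySem.Int.mod (nums.getD j 0) 2 ≠ 0 then pvScanOdd nums fuel (j + 1)
    else j

-- outer loop; `j == n` is tested as `n ≤ j` (equivalent: j never exceeds n) and fuel is a totality guard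
def pvAltGo (nums : List Int) (fuel : Nat) (best : Int) (i : Nat) : Int :=
  match fuel with
  | 0 => best
  | fuel + 1 =>
    let j := pvScanOdd nums (nums.length - i) i
    if nums.length ≤ j then best
    else pvAltGo nums fuel (max best ((j : Int) - (i : Int))) (j + 1)

def length_even_nums_alt (nums : List Int) : Int := pvAltGo nums (nums.length + 1) 0 0

-- ===== PRECONDITION & SPEC =====
def Spec_length_even_nums (nums : List Int) (out : Int) : Prop := out = length_even_nums_alt nums
instance (nums : List Int) (out : Int) : Decidable (Spec_length_even_nums nums out) := by unfold Spec_length_even_nums; infer_instance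

-- ===== CLAIM (what is proved, stated in full; the proofs are below) =====
def Claim_equal_length_even_nums : Prop := ∀ (nums : List Int), Dom_length_even_nums nums → Spec_length_even_nums nums (length_even_nums nums)

-- ===== LEMMAS AND PROOFS =====

-- pvH i xs: the final `longest` of A's loop over xs, started with current run i and longest 0
def pvH (i : Int) : List Int → Int
  | [] => 0
  | x :: xs => if PySem.Int.mod x 2 ≠ 0 then pvH (i + 1) xs else max i (pvH 0 xs)

theorem pvH_nonneg (xs : List Int) : ∀ i : Int, 0 ≤ i → 0 ≤ pvH i xs := by
  induction xs with
  | nil => intro i _; simp [pvH]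
  | cons x xs ih =>
    intro i hi
    simp only [pvH]
    split
    · exact ih (i + 1) (by omega)
    · have := ih 0 le_rfl; exact le_max_of_le_right this

theorem pvFold_eq (xs : List Int) : ∀ i L : Int, 0 ≤ i → 0 ≤ L →
    (xs.foldl
      (fun (s : Int × Int) x =>
        if PySem.Int.mod x 2 ≠ 0 then (s.1 + 1, s.2)
        else (0, max s.1 s.2))
      (i, L)).2 = max L (pvH i xs) := by
  induction xs with
  | nil => intro i L hi hL; simp [pvH]; omega
  | cons x xs ih =>
    intro i L hi hL
    simp only [List.foldl_cons, pvH]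
    by_cases h : PySem.Int.mod x 2 ≠ 0
    · simp only [if_pos h]
      exact ih (i + 1) L (by omega) hL
    · simp only [if_neg h]
      rw [ih 0 (max i L) le_rfl (le_max_of_le_right hL)]
      have := pvH_nonneg xs 0 le_rfl
      omega

-- pvH absorbs the leading odd run
theorem pvH_strip (xs : List Int) : ∀ i : Int, 0 ≤ i →
    pvH i xs =
      (if (xs.takeWhile (fun x => decide (PySem.Int.mod x 2 ≠ 0))).length = xs.length then 0
       else max (i + ((xs.takeWhile (fun x => decide (PySem.Int.mod x 2 ≠ 0))).length : Int))
            (pvH 0 (xs.drop ((xs.takeWhile (fun x => decide (PySem.Int.mod x 2 ≠ 0))).length + 1)))) := by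
  induction xs with
  | nil => intro i _; simp [pvH]
  | cons x xs ih =>
    intro i hi
    by_cases h : PySem.Int.mod x 2 ≠ 0
    · simp only [pvH, List.takeWhile_cons, decide_eq_true_eq, if_pos h,
        List.length_cons, List.drop_succ_cons]
      rw [ih (i + 1) (by omega)]
      have hc : ((xs.takeWhile (fun x => decide (PySem.Int.mod x 2 ≠ 0))).length + 1 = xs.length + 1)
          ↔ ((xs.takeWhile (fun x => decide (PySem.Int.mod x 2 ≠ 0))).length = xs.length) := by omega
      simp only [hc]
      split
      · rfl
      · omega
    · simp only [pvH, List.takeWhile_cons, decide_eq_true_eq, if_neg h,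
        List.length_nil]
      simp

theorem pvScanOdd_eq (nums : List Int) : ∀ (fuel : Nat), ∀ j : Nat, nums.length - j ≤ fuel → j ≤ nums.length →
    pvScanOdd nums fuel j = j + ((nums.drop j).takeWhile (fun x => decide (PySem.Int.mod x 2 ≠ 0))).length := by
  intro fuel
  induction fuel with
  | zero =>
    intro j hfuel hj
    have hje : j = nums.length := by omega
    simp [pvScanOdd, hje]
  | succ n ih =>
    intro j hfuel hj
    rw [pvScanOdd]
    by_cases hlt : j < nums.length
    · have hdrop : nums.drop j = nums[j] :: nums.drop (j + 1) := List.drop_eq_getElem_cons hlt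
      have hgetD : nums.getD j 0 = nums[j] := List.getD_eq_getElem nums 0 hlt
      by_cases hodd : PySem.Int.mod nums[j] 2 ≠ 0
      · rw [if_pos ⟨hlt, by rw [hgetD]; exact hodd⟩, ih (j + 1) (by omega) (by omega),
          hdrop, List.takeWhile_cons, if_pos (by simpa using hodd)]
        simp
        omega
      · rw [if_neg (by rw [hgetD]; tauto), hdrop, List.takeWhile_cons,
          if_neg (by simpa using hodd)]
        simp
    · have hje : j = nums.length := by omega
      rw [if_neg (by tauto)]
      simp [hje]

theorem pvH_all_odd (s : List Int) (h : (s.takeWhile (fun x => decide (PySem.Int.mod x 2 ≠ 0))).length = s.length) :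
    ∀ i : Int, pvH i s = 0 := by
  induction s with
  | nil => intro i; simp [pvH]
  | cons x xs ih =>
    intro i
    rw [List.takeWhile_cons] at h
    by_cases hodd : PySem.Int.mod x 2 ≠ 0
    · rw [if_pos (by simpa using hodd)] at h
      simp only [List.length_cons, Nat.add_right_cancel_iff] at h
      simp only [pvH, if_pos hodd]
      exact ih h (i + 1)
    · rw [if_neg (by simpa using hodd)] at h
      simp at h

theorem pvAltGo_eq (nums : List Int) : ∀ (fuel : Nat), ∀ i : Nat, nums.length - i < fuel → i ≤ nums.length → ∀ best : Int, 0 ≤ best →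
    pvAltGo nums fuel best i = max best (pvH 0 (nums.drop i)) := by
  intro fuel
  induction fuel with
  | zero =>
    intro i hfuel
    exact absurd hfuel (Nat.not_lt_zero _)
  | succ n ih =>
    intro i hfuel hi best hbest
    rw [pvAltGo]
    rw [pvScanOdd_eq nums (nums.length - i) i le_rfl hi]
    have hle := (List.takeWhile_sublist (l := nums.drop i) (fun x => decide (PySem.Int.mod x 2 ≠ 0))).length_le
    rw [List.length_drop] at hle
    by_cases hend : nums.length ≤ i + ((nums.drop i).takeWhile (fun x => decide (PySem.Int.mod x 2 ≠ 0))).length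
    · rw [if_pos hend]
      rw [pvH_all_odd (nums.drop i) (by rw [List.length_drop]; omega) 0]
      omega
    · rw [if_neg hend,
        ih (i + ((nums.drop i).takeWhile (fun x => decide (PySem.Int.mod x 2 ≠ 0))).length + 1)
          (by omega) (by omega) _ (le_trans hbest (le_max_left _ _))]
      rw [pvH_strip (nums.drop i) 0 le_rfl,
        if_neg (by rw [List.length_drop]; omega)]
      rw [show (nums.drop i).drop (((nums.drop i).takeWhile (fun x => decide (PySem.Int.mod x 2 ≠ 0))).length + 1)
          = nums.drop (i + ((nums.drop i).takeWhile (fun x => decide (PySem.Int.mod x 2 ≠ 0))).length + 1) by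
        simp [List.drop_drop, Nat.add_assoc]]
      have h0 : (0 : Int) ≤ pvH 0 (nums.drop (i + ((nums.drop i).takeWhile (fun x => decide (PySem.Int.mod x 2 ≠ 0))).length + 1)) :=
        pvH_nonneg _ 0 le_rfl
      push_cast
      omega

-- ===== VERDICT (by name: the statement is the Claim_ definition above) =====
theorem length_even_nums_spec : Claim_equal_length_even_nums := by
  intro nums _
  unfold Spec_length_even_nums length_even_nums
  rw [pvFold_eq nums 0 0 le_rfl le_rfl]
  unfold length_even_nums_alt
  rw [pvAltGo_eq nums (nums.length + 1) 0 (by omega) (by omega) 0 le_rfl]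
  simp only [List.drop_zero]
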